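-- pv_equiv track=rewrite | github.com/SantinoVicentini/LearningPython-utdt-exercises | clase1/clase.py | nave_cercana
-- ===== SOURCE A (Python) =====
-- def nave_cercana(sensado:list[int], p:int)->bool:
--     vr:bool = False
--     i:int = 0
--     while i < len(sensado):
--         if sensado[i] <= p:
--             vr = True
--         i += 1
--     return vr
-- ===== SOURCE B (Python) =====
-- def nave_cercana(sensado: list[int], p: int) -> bool:
--     return bool(sensado) and min(sensado) <= p
-- ===== Notes on version B (the rewrite author's own statement) =====
-- stated objective: simpler
-- what changed: Replaces the index-driven while loop maintaining a boolean flag with a single aggregate computation: take the minimum of the list (guarded for emptiness) and compare it to p once.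
import Mathlib
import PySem

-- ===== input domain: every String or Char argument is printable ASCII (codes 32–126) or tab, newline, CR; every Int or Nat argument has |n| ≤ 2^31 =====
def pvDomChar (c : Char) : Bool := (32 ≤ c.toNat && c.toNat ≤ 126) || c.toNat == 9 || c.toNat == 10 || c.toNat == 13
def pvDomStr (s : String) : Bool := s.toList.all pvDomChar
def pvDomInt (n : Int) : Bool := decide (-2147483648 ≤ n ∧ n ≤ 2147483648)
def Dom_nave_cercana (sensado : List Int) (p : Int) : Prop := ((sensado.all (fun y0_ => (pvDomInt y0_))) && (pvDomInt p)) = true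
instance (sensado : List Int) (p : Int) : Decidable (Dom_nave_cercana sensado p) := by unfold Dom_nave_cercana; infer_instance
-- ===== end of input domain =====

-- B replaces A's flag-maintaining index loop by min-then-compare (objective: simpler).

-- ===== PORT A =====
-- A: while loop over indices, setting vr := true whenever sensado[i] ≤ p;
-- ported as a structural fold over the list carrying the flag vr.
def nave_cercana (sensado : List Int) (p : Int) : Bool :=
  sensado.foldl (fun vr x => if x ≤ p then true else vr) false

-- ===== PORT B =====
-- B: bool(sensado) and min(sensado) <= p; Python's min over a nonempty list = foldl min.
def nave_cercana_alt (sensado : List Int) (p : Int) : Bool :=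
  match sensado with
  | [] => false
  | x :: xs => decide (xs.foldl min x ≤ p)

-- ===== PRECONDITION & SPEC =====
def Spec_nave_cercana (sensado : List Int) (p : Int) (out : Bool) : Prop := out = nave_cercana_alt sensado p
instance (sensado : List Int) (p : Int) (out : Bool) : Decidable (Spec_nave_cercana sensado p out) := by unfold Spec_nave_cercana; infer_instance

-- ===== CLAIM (what is proved, stated in full; the proofs are below) =====
def Claim_equal_nave_cercana : Prop := ∀ (sensado : List Int) (p : Int), Dom_nave_cercana sensado p → Spec_nave_cercana sensado p (nave_cercana sensado p)

-- ===== LEMMAS AND PROOFS =====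

theorem pv_foldA_or (l : List Int) (p : Int) (acc : Bool) :
    l.foldl (fun vr x => if x ≤ p then true else vr) acc
      = (acc || l.any (fun x => decide (x ≤ p))) := by
  induction l generalizing acc with
  | nil => simp
  | cons y ys ih =>
      simp only [List.foldl_cons, List.any_cons, ih]
      by_cases h : y ≤ p <;> simp [h]

theorem pv_foldMin_le (xs : List Int) (x p : Int) :
    decide (xs.foldl min x ≤ p)
      = (decide (x ≤ p) || xs.any (fun y => decide (y ≤ p))) := by
  induction xs generalizing x with
  | nil => simp
  | cons y ys ih =>
      rw [List.foldl_cons, ih (min x y), List.any_cons]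
      simp [Bool.or_assoc]

-- ===== VERDICT (by name: the statement is the Claim_ definition above) =====
theorem nave_cercana_spec : Claim_equal_nave_cercana := by
  intro sensado p _
  unfold Spec_nave_cercana nave_cercana nave_cercana_alt
  cases sensado with
  | nil => rfl
  | cons x xs =>
      rw [pv_foldA_or]
      show _ = decide (xs.foldl min x ≤ p)
      rw [pv_foldMin_le]
      simp
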